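-- pv_equiv track=rewrite | github.com/ABHISHEKVALSAN/PLACEMENT-PREP | TESTS/2019/clumio/vowelSubString.py | vowelSubString
-- ===== SOURCE A (Python) =====
-- def vowelSubString(string):
-- 	l = []
-- 	s = []
-- 	for letter in string:
-- 		if letter in ['a','e','i','o','u']:
-- 			s.append(letter)
-- 		else:
-- 			l.append(s)
-- 			s=[]
-- 	l.append(s)
-- 	return l
-- ===== SOURCE B (Python) =====
-- import re
--
-- def vowelSubString(string):
--     return [list(part) for part in re.split(r'[^aeiou]', string)]
-- ===== Notes on version B (the rewrite author's own statement) =====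
-- stated objective: idiomatic
-- what changed: Replaced the manual accumulator loop (current-run list flushed on each consonant) with a single re.split on the non-vowel character class, mapping each substring to its character list.
import Mathlib
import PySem

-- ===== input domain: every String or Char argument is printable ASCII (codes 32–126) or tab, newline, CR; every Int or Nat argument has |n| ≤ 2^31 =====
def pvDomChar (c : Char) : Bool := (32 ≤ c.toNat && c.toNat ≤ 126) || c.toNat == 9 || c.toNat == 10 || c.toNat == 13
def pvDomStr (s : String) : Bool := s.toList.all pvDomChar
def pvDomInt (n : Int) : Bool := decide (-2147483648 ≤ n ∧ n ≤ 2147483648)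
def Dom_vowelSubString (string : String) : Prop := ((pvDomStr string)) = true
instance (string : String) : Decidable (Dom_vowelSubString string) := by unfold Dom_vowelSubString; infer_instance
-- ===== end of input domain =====

-- B replaces A's flush-on-consonant accumulator loop by a regex-style split on non-vowels; objective: idiomatic.

-- ===== PORT A =====
-- A: fold over the characters with state (l, s); a vowel extends s, anything else flushes s into l; finally l ++ [s].
def vowelSubString (string : String) : List (List String) :=
  let r := string.toList.foldl
    (fun (st : List (List String) × List String) letter =>
      if letter ∈ ['a','e','i','o','u'] then (st.1, st.2 ++ [String.singleton letter])
      else (st.1 ++ [st.2], []))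
    ([], [])
  r.1 ++ [r.2]

-- ===== PORT B =====
-- B: re.split('[^aeiou]', string) ported as a structural split of the character list on non-vowel delimiters
-- (exact for single-character delimiters; each resulting part is mapped to its list of characters).
def pvSplitNonVowel : List Char → List (List String)
  | [] => [[]]
  | c :: rest =>
    if c ∈ ['a','e','i','o','u'] then
      match pvSplitNonVowel rest with
      | h :: t => (String.singleton c :: h) :: t
      | [] => [[String.singleton c]]
    else
      [] :: pvSplitNonVowel rest

def vowelSubString_alt (string : String) : List (List String) :=
  pvSplitNonVowel string.toList

-- ===== PRECONDITION & SPEC =====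
def Spec_vowelSubString (string : String) (out : List (List String)) : Prop := out = vowelSubString_alt string
instance (string : String) (out : List (List String)) : Decidable (Spec_vowelSubString string out) := by unfold Spec_vowelSubString; infer_instance

-- ===== CLAIM (what is proved, stated in full; the proofs are below) =====
def Claim_equal_vowelSubString : Prop := ∀ (string : String), Dom_vowelSubString string → Spec_vowelSubString string (vowelSubString string)

-- ===== LEMMAS AND PROOFS =====
def pvConsHead (s : List String) : List (List String) → List (List String)
  | [] => [s]
  | h :: t => (s ++ h) :: t

theorem pvSplitNonVowel_ne_nil (cs : List Char) : pvSplitNonVowel cs ≠ [] := by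
  cases cs with
  | nil => simp [pvSplitNonVowel]
  | cons c rest =>
    simp only [pvSplitNonVowel]
    split
    · cases h : pvSplitNonVowel rest <;> simp
    · simp

theorem pvFold_eq (cs : List Char) : ∀ (l : List (List String)) (s : List String),
    (cs.foldl
      (fun (st : List (List String) × List String) letter =>
        if letter ∈ ['a','e','i','o','u'] then (st.1, st.2 ++ [String.singleton letter])
        else (st.1 ++ [st.2], []))
      (l, s)).1
     ++ [(cs.foldl
      (fun (st : List (List String) × List String) letter =>
        if letter ∈ ['a','e','i','o','u'] then (st.1, st.2 ++ [String.singleton letter])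
        else (st.1 ++ [st.2], []))
      (l, s)).2]
    = l ++ pvConsHead s (pvSplitNonVowel cs) := by
  induction cs with
  | nil => intro l s; simp [pvSplitNonVowel, pvConsHead]
  | cons c rest ih =>
    intro l s
    simp only [List.foldl_cons, pvSplitNonVowel]
    by_cases hc : c ∈ ['a','e','i','o','u']
    · simp only [hc, if_pos]
      rw [ih]
      cases h : pvSplitNonVowel rest with
      | nil => simp [pvConsHead]
      | cons h0 t => simp [pvConsHead]
    · simp only [hc, if_false]
      rw [ih]
      cases h : pvSplitNonVowel rest with
      | nil => exact absurd h (pvSplitNonVowel_ne_nil rest)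
      | cons h0 t => simp [pvConsHead]

-- ===== VERDICT (by name: the statement is the Claim_ definition above) =====
theorem vowelSubString_spec : Claim_equal_vowelSubString := by
  intro string _
  unfold Spec_vowelSubString vowelSubString vowelSubString_alt
  have h := pvFold_eq string.toList [] []
  cases hs : pvSplitNonVowel string.toList with
  | nil => exact absurd hs (pvSplitNonVowel_ne_nil _)
  | cons h0 t => simp only [hs, pvConsHead, List.nil_append] at h ⊢; simpa using h
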